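-- pv_equiv track=rewrite | github.com/sajjadanwar0/sbus-experiments | exp_adversarial_rhidden_v2.py | scan_for_shard_refs
-- ===== SOURCE A (Python) =====
-- def scan_for_shard_refs(text: str, shard_base_names: list[str]) -> list[str]:
--     hits = []
--     if not text:
--         return hits
--     low = text.lower()
--     for sk in shard_base_names:
--         if sk.lower() in low:
--             hits.append(sk)
--     return hits
-- ===== SOURCE B (Python) =====
-- def scan_for_shard_refs(text: str, shard_base_names: list[str]) -> list[str]:
--     # Position-driven scan: walk the lowered text once left-to-right and at each
--     # position test each not-yet-found lowered pattern as a prefix; emit hits in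
--     # input order at the end.
--     low = text.lower()
--     pats = [sk.lower() for sk in shard_base_names]
--     found = [False] * len(pats)
--     for i in range(len(low)):
--         for j, p in enumerate(pats):
--             if not found[j] and low.startswith(p, i):
--                 found[j] = True
--     return [sk for sk, f in zip(shard_base_names, found) if f]
-- ===== Notes on version B (the rewrite author's own statement) =====
-- stated objective: alternative
-- what changed: A searches the lowered text once per pattern with 'in'; B lowers each pattern once, then makes a single left-to-right pass over the lowered text, prefix-matching every not-yet-found pattern at each position into a found-flag array, and finally emits the names whose flag is set, in input order.
import Mathlib
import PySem

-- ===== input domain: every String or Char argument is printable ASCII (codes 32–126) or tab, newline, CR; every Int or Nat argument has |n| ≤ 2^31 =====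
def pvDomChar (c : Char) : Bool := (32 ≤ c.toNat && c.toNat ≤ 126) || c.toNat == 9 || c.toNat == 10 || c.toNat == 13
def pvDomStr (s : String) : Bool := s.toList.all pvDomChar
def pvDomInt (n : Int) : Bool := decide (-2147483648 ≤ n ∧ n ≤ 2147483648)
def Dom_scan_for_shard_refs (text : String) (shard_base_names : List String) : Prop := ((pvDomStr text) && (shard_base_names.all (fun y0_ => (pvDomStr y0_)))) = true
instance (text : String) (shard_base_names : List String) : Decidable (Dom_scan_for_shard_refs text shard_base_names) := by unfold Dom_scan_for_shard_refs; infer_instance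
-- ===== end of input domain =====

-- B replaces A's per-pattern substring searches by a single left-to-right scan of the
-- lowered text that prefix-matches every not-yet-found lowered pattern at each position
-- (objective: alternative traversal, same exact results).

-- ===== PORT A =====
def scan_for_shard_refs (text : String) (shard_base_names : List String) : List String :=
  -- hits = []; if not text: return hits
  if text = "" then []
  else
    let low := PySem.Str.lower text
    -- for sk in shard_base_names: if sk.lower() in low: hits.append(sk)
    shard_base_names.foldl
      (fun hits sk => if PySem.Str.isIn (PySem.Str.lower sk) low then hits ++ [sk] else hits) []

-- ===== PORT B =====
def scan_for_shard_refs_alt (text : String) (shard_base_names : List String) : List String :=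
  let low := (PySem.Str.lower text).toList
  let pats := shard_base_names.map (fun sk => (PySem.Str.lower sk).toList)
  -- found = [False]*len(pats); for i in range(len(low)): for j,p: found[j] = found[j] or low.startswith(p, i)
  let found := (List.range low.length).foldl
    (fun found i =>
      (pats.zip found).map (fun pf => pf.2 || PySem.Chars.startswith (low.drop i) pf.1))
    (pats.map (fun _ => false))
  ((shard_base_names.zip found).filter (fun sf => sf.2)).map (fun sf => sf.1)

-- ===== PRECONDITION & SPEC =====
def Spec_scan_for_shard_refs (text : String) (shard_base_names : List String) (out : List String) : Prop := out = scan_for_shard_refs_alt text shard_base_names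
instance (text : String) (shard_base_names : List String) (out : List String) : Decidable (Spec_scan_for_shard_refs text shard_base_names out) := by unfold Spec_scan_for_shard_refs; infer_instance

-- ===== CLAIM (what is proved, stated in full; the proofs are below) =====
def Claim_equal_scan_for_shard_refs : Prop := ∀ (text : String) (shard_base_names : List String), Dom_scan_for_shard_refs text shard_base_names → Spec_scan_for_shard_refs text shard_base_names (scan_for_shard_refs text shard_base_names)

-- ===== LEMMAS AND PROOFS =====

-- zipping a list with a map of itself and recombining componentwise is a plain map
lemma zip_map_self {α β γ : Type} (g : α → β) (h : α × β → γ) (l : List α) :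
    (l.zip (l.map g)).map h = l.map (fun x => h (x, g x)) := by
  induction l with
  | nil => simp
  | cons a t ih => simp [ih]

-- zip-with-flags, filter on the flag, project: the usual filter
lemma zip_filter_fst {α : Type} (g : α → Bool) (l : List α) :
    (((l.zip (l.map g)).filter (fun sf => sf.2)).map (fun sf => sf.1)) = l.filter g := by
  induction l with
  | nil => simp
  | cons a t ih =>
    by_cases h : g a <;> simp [h, ih]

-- the scan loop computes, for each pattern, whether it matches at some position < n
lemma scan_loop_eq (low : List Char) (pats : List (List Char)) (n : Nat) :
    (List.range n).foldl
      (fun found i =>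
        (pats.zip found).map (fun pf => pf.2 || PySem.Chars.startswith (low.drop i) pf.1))
      (pats.map (fun _ => false))
    = pats.map (fun p => (List.range n).any (fun i => PySem.Chars.startswith (low.drop i) p)) := by
  induction n with
  | zero => simp
  | succ n ih =>
    rw [List.range_succ, List.foldl_append, ih]
    simp only [List.foldl_cons, List.foldl_nil]
    rw [zip_map_self]
    simp

-- on a nonempty text, "matched at some position" is exactly Python's substring test
lemma any_range_eq_isIn (low : List Char) (p : List Char) (hne : low ≠ []) :
    (List.range low.length).any (fun i => PySem.Chars.startswith (low.drop i) p)
      = PySem.Chars.isIn p low := by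
  rcases hb : PySem.Chars.isIn p low with _ | _
  · -- isIn is false: no position matches
    simp only [List.any_eq_false]
    intro i _hi
    by_contra hsw
    rw [PySem.Chars.startswith_iff] at hsw
    have : PySem.Chars.isIn p low = true :=
      (PySem.Chars.exists_prefix_drop_iff_isIn p low).mp ⟨i, hsw⟩
    simp [hb] at this
  · -- isIn is true: some position (possibly clamped to 0 for the empty pattern) matches
    obtain ⟨j, hj⟩ := (PySem.Chars.exists_prefix_drop_iff_isIn p low).mpr hb
    rw [List.any_eq_true]
    by_cases hlt : j < low.length
    · exact ⟨j, by simp [hlt], (PySem.Chars.startswith_iff _ _).mpr hj⟩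
    · have hdrop : low.drop j = [] := List.drop_eq_nil_of_le (by omega)
      have hp : p = [] := List.prefix_nil.mp (hdrop ▸ hj)
      refine ⟨0, by simp [List.length_pos_iff.mpr hne], ?_⟩
      rw [PySem.Chars.startswith_iff]
      simp [hp]

-- ===== VERDICT (by name: the statement is the Claim_ definition above) =====
theorem scan_for_shard_refs_spec : Claim_equal_scan_for_shard_refs := by
  intro text names _hdom
  unfold Spec_scan_for_shard_refs scan_for_shard_refs scan_for_shard_refs_alt
  dsimp only
  rw [scan_loop_eq, List.map_map, zip_filter_fst]
  by_cases h : text = ""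
  · subst h
    simp [PySem.Chars.lower]
  · rw [if_neg h, PySem.List.foldl_append_if, List.nil_append, List.map_id']
    refine List.filter_congr (fun sk _ => ?_)
    have hne : (PySem.Str.lower text).toList ≠ [] := by
      simp only [PySem.Str.toList_lower, PySem.Chars.lower, ne_eq, List.map_eq_nil_iff]
      intro hc
      exact h (by rw [← String.ofList_toList (s := text), hc])
    simp only [Function.comp_apply]
    rw [any_range_eq_isIn _ _ hne, PySem.Str.isIn_eq, PySem.Str.toList_lower,
        PySem.Str.toList_lower]
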